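-- pv_equiv track=rewrite | github.com/nuagenetworks/nuage-metroae | roles/vns-deploy/files/vsc_config.py | get_vsclines
-- ===== SOURCE A (Python) =====
-- def get_vsclines(fp):
--     vsc_lines = []
--     vsc_start = False
--     for line in fp:
--         # Removes any whitespace before and after the line
--         line = line.strip().split(" ")[0]
--         if (line.startswith("[vscs]")):
--             vsc_start = True
--
--         # Start appending lines only for [vscs] group
--         if (vsc_start and line):
--             if (line.startswith("[")):
--                 # Reset flag to False if group name is other than vscs
--                 if (not line.startswith("[vscs]")):
--                     vsc_start = False
--             else:
--                 vsc_lines.append(line)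
--
--     yield vsc_lines
-- ===== SOURCE B (Python) =====
-- def get_vsclines(fp):
--     # Two-phase decomposition: first parse the file into (header, content)
--     # sections, then concatenate the content of every [vscs]* section.
--     sections = []
--     cur = None
--     for line in fp:
--         tok = line.strip().split(" ")[0]
--         if tok.startswith("["):
--             if cur is not None:
--                 sections.append(cur)
--             cur = (tok, [])
--         elif cur is not None and tok:
--             cur[1].append(tok)
--     if cur is not None:
--         sections.append(cur)
--     result = []
--     for header, content in sections:
--         if header.startswith("[vscs]"):
--             result.extend(content)
--     yield result
-- ===== Notes on version B (the rewrite author's own statement) =====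
-- stated objective: alternative
-- what changed: Replaces A's per-line boolean flag machine with a two-phase parse: one pass groups tokens into (header, content) sections, a second pass concatenates the content of sections whose header starts with '[vscs]'.
import Mathlib
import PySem

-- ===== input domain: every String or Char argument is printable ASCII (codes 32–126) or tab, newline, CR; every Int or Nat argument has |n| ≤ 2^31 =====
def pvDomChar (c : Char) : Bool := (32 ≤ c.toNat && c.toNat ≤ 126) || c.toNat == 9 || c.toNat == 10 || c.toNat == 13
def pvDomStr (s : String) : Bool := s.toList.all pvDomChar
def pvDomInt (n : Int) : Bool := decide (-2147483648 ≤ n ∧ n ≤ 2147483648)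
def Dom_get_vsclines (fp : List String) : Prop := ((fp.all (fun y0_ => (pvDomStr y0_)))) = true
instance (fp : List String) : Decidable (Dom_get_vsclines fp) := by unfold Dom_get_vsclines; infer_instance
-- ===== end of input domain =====

-- B is an alternative decomposition of A: a two-phase parse (group tokens into
-- (header, content) sections, then concatenate the content of '[vscs]'-headed
-- sections) instead of A's per-line boolean flag machine; same cost.

-- shared by both Pythons: line.strip().split(" ")[0]
def pvTok (line : String) : String :=
  match PySem.List.pyGet? ((PySem.Str.split? (PySem.Str.strip line) " ").getD []) 0 with
  | some t => t
  | none => ""  -- unreachable: split(" ") is never the empty list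

-- ===== PORT A =====
def stepA (st : List String × Bool) (line : String) : List String × Bool :=
  let tok := pvTok line
  let vs := if PySem.Str.startswith tok "[vscs]" then true else st.2
  if vs && !(tok == "") then
    if PySem.Str.startswith tok "[" then
      if !(PySem.Str.startswith tok "[vscs]") then (st.1, false) else (st.1, vs)
    else (st.1 ++ [tok], vs)
  else (st.1, vs)

def get_vsclines (fp : List String) : List (List String) :=
  [(fp.foldl stepA ([], false)).1]

-- ===== PORT B =====
def stepB (st : List (String × List String) × Option (String × List String))
    (line : String) : List (String × List String) × Option (String × List String) :=
  let tok := pvTok line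
  if PySem.Str.startswith tok "[" then
    ((match st.2 with | some c => st.1 ++ [c] | none => st.1), some (tok, []))
  else
    match st.2 with
    | some c => if tok == "" then st else (st.1, some (c.1, c.2 ++ [tok]))
    | none => st

def closeB (st : List (String × List String) × Option (String × List String)) :
    List (String × List String) :=
  match st.2 with | some c => st.1 ++ [c] | none => st.1

def collectB (secs : List (String × List String)) : List String :=
  secs.foldl (fun r s => if PySem.Str.startswith s.1 "[vscs]" then r ++ s.2 else r) []

def get_vsclines_alt (fp : List String) : List (List String) :=
  [collectB (closeB (fp.foldl stepB ([], none)))]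

-- ===== PRECONDITION & SPEC =====
def Spec_get_vsclines (fp : List String) (out : List (List String)) : Prop := out = get_vsclines_alt fp
instance (fp : List String) (out : List (List String)) : Decidable (Spec_get_vsclines fp out) := by unfold Spec_get_vsclines; infer_instance

-- ===== CLAIM (what is proved, stated in full; the proofs are below) =====
def Claim_equal_get_vsclines : Prop := ∀ (fp : List String), Dom_get_vsclines fp → Spec_get_vsclines fp (get_vsclines fp)

-- ===== LEMMAS AND PROOFS =====

-- A's flag, read off from B's open section
def flagOf (cur : Option (String × List String)) : Bool :=
  match cur with
  | some c => PySem.Str.startswith c.1 "[vscs]"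
  | none => false

-- lines the open section will contribute if it is a vscs section
def curCont (cur : Option (String × List String)) : List String :=
  match cur with
  | some c => if PySem.Str.startswith c.1 "[vscs]" then c.2 else []
  | none => []

theorem collectB_init (secs : List (String × List String)) (r : List String) :
    secs.foldl (fun r s => if PySem.Str.startswith s.1 "[vscs]" then r ++ s.2 else r) r
      = r ++ collectB secs := by
  induction secs generalizing r with
  | nil => simp [collectB]
  | cons a l ih =>
    simp only [collectB, List.foldl_cons]
    rw [ih, ih (if PySem.Str.startswith a.1 "[vscs]" then [] ++ a.2 else [])]
    split <;> simp

theorem collectB_append (s1 s2 : List (String × List String)) :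
    collectB (s1 ++ s2) = collectB s1 ++ collectB s2 := by
  simp only [collectB, List.foldl_append]
  rw [collectB_init]
  rfl

theorem stepB_shift (st : List (String × List String) × Option (String × List String))
    (line : String) :
    stepB st line = (st.1 ++ (stepB ([], st.2) line).1, (stepB ([], st.2) line).2) := by
  obtain ⟨s, cur⟩ := st
  simp only [stepB]
  cases cur <;> split <;> simp_all <;> split <;> simp

theorem foldB_shift (fp : List String)
    (s : List (String × List String)) (cur : Option (String × List String)) :
    fp.foldl stepB (s, cur)
      = (s ++ (fp.foldl stepB ([], cur)).1, (fp.foldl stepB ([], cur)).2) := by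
  induction fp generalizing s cur with
  | nil => simp
  | cons line rest ih =>
    simp only [List.foldl_cons]
    rw [stepB_shift (s, cur), ih (s ++ (stepB ([], cur) line).1) ((stepB ([], cur) line).2),
        ← Prod.mk.eta (p := stepB ([], cur) line),
        ih ((stepB ([], cur) line).1) ((stepB ([], cur) line).2)]
    simp

theorem tok_ne_of_bracket {tok : String}
    (h : PySem.Chars.startswith tok.toList ['['] = true) :
    (tok == "") = false := by
  have h' := (PySem.Chars.startswith_iff tok.toList ['[']).mp h
  rcases h' with ⟨t, ht⟩
  simp only [beq_eq_false_iff_ne, ne_eq]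
  rintro rfl
  simp at ht

theorem vscs_startswith_bracket {tok : String}
    (h : PySem.Chars.startswith tok.toList ['[', 'v', 's', 'c', 's', ']'] = true) :
    PySem.Chars.startswith tok.toList ['['] = true := by
  rw [PySem.Chars.startswith_iff] at *
  exact List.IsPrefix.trans (by decide) h

-- stepA on a header token: lines unchanged, flag becomes startswith [vscs]
theorem stepA_header (acc : List String) (f : Bool) (line : String)
    (hb : PySem.Chars.startswith (pvTok line).toList ['['] = true) :
    stepA (acc, f) line = (acc, PySem.Str.startswith (pvTok line) "[vscs]") := by
  have hne := tok_ne_of_bracket hb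
  cases hv : PySem.Chars.startswith (pvTok line).toList ['[', 'v', 's', 'c', 's', ']'] <;>
    cases f <;> simp [stepA, hb, hne, hv]

-- stepA on a non-header token: appended exactly when the flag is up and the token non-empty
theorem stepA_plain (acc : List String) (f : Bool) (line : String)
    (hb : PySem.Chars.startswith (pvTok line).toList ['['] = false) :
    stepA (acc, f) line
      = (if f && !(pvTok line == "") then (acc ++ [pvTok line], f) else (acc, f)) := by
  have hv : PySem.Chars.startswith (pvTok line).toList ['[', 'v', 's', 'c', 's', ']'] = false := by
    by_contra h
    have := vscs_startswith_bracket (tok := pvTok line) (by simpa using h)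
    simp [hb] at this
  cases f <;> cases he : (pvTok line == "") <;> simp [stepA, hb, hv, he]

set_option maxHeartbeats 1600000 in
theorem main_inv (fp : List String) (acc : List String)
    (cur : Option (String × List String)) :
    (fp.foldl stepA (acc ++ curCont cur, flagOf cur)).1
      = acc ++ collectB (closeB (fp.foldl stepB ([], cur))) := by
  induction fp generalizing acc cur with
  | nil =>
    cases cur with
    | none => simp [closeB, collectB, curCont]
    | some c =>
      by_cases h : PySem.Str.startswith c.1 "[vscs]" = true <;>
        simp [closeB, collectB, curCont, h]
  | cons line rest ih =>
    simp only [List.foldl_cons]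
    cases hb : PySem.Chars.startswith (pvTok line).toList ['['] with
    | true =>
      -- header line: B closes cur and opens a fresh section
      rw [stepA_header _ _ _ hb]
      have hB : stepB ([], cur) line = (closeB ([], cur), some (pvTok line, [])) := by
        cases cur <;> simp [stepB, hb, closeB]
      rw [hB, foldB_shift]
      have h1 : (PySem.Str.startswith (pvTok line) "[vscs]")
          = flagOf (some (pvTok line, [])) := by simp [flagOf]
      have h2 : acc ++ curCont cur
          = (acc ++ curCont cur) ++ curCont (some (pvTok line, [])) := by
        simp [curCont]
      rw [h1, h2, ih]
      have h3 : closeB ((closeB ([], cur) ++ (List.foldl stepB ([], some (pvTok line, [])) rest).1,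
              (List.foldl stepB ([], some (pvTok line, [])) rest).2))
          = closeB ([], cur) ++ closeB (List.foldl stepB ([], some (pvTok line, [])) rest) := by
        rcases List.foldl stepB ([], some (pvTok line, [])) rest with ⟨s', cur'⟩
        cases cur' <;> simp [closeB]
      rw [h3, collectB_append]
      have h4 : collectB (closeB ([], cur)) = curCont cur := by
        cases cur with
        | none => simp [closeB, collectB, curCont]
        | some c =>
          by_cases h : PySem.Str.startswith c.1 "[vscs]" = true <;>
            simp [closeB, collectB, curCont, h]
      rw [h4]
      simp
    | false =>
      rw [stepA_plain _ _ _ hb]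
      cases cur with
      | none =>
        have hB : stepB ([], (none : Option (String × List String))) line = ([], none) := by
          simp [stepB, hb]
        rw [hB]
        have : (if flagOf (none : Option (String × List String)) && !(pvTok line == "")
            then (acc ++ curCont (none : Option (String × List String)) ++ [pvTok line],
                  flagOf (none : Option (String × List String)))
            else (acc ++ curCont (none : Option (String × List String)),
                  flagOf (none : Option (String × List String))))
            = (acc ++ curCont (none : Option (String × List String)),
               flagOf (none : Option (String × List String))) := by
          simp [flagOf]
        rw [this, ih]
      | some c =>
        cases he : (pvTok line == "") with
        | true =>
          have hB : stepB ([], some c) line = ([], some c) := by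
            simp [stepB, hb, he]
          rw [hB]
          simp only [Bool.not_true, Bool.and_false, Bool.false_eq_true, if_false]
          exact ih acc (some c)
        | false =>
          have hB : stepB ([], some c) line = ([], some (c.1, c.2 ++ [pvTok line])) := by
            simp [stepB, hb, he]
          rw [hB]
          have key : (if (flagOf (some c) && !false) = true
              then (acc ++ curCont (some c) ++ [pvTok line], flagOf (some c))
              else (acc ++ curCont (some c), flagOf (some c)))
              = (acc ++ curCont (some (c.1, c.2 ++ [pvTok line])),
                 flagOf (some (c.1, c.2 ++ [pvTok line]))) := by
            cases hv : PySem.Chars.startswith c.1.toList ['[', 'v', 's', 'c', 's', ']'] <;>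
              simp [flagOf, curCont, hv]
          rw [key]
          exact ih acc (some (c.1, c.2 ++ [pvTok line]))

-- ===== VERDICT (by name: the statement is the Claim_ definition above) =====
theorem get_vsclines_spec : Claim_equal_get_vsclines := by
  intro fp _
  unfold Spec_get_vsclines get_vsclines get_vsclines_alt
  have := main_inv fp [] none
  simpa [curCont, flagOf] using this
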